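-- pv_equiv track=rewrite | github.com/matus-ruscak/AdventOfCode | advent_of_code_2023/aoc_day_14a.py | get_final_upstream_position
-- ===== SOURCE A (Python) =====
-- def get_final_upstream_position(current_index, line):
--     if current_index == 0:
--         return 0
--     current_index = current_index - 1
--     upstream_character = line[current_index]
--     if upstream_character in ('O', '#'):
--         return current_index + 1
--     else:
--         return get_final_upstream_position(current_index, line)
-- ===== SOURCE B (Python) =====
-- def get_final_upstream_position(current_index, line):
--     result = 0
--     for i, ch in enumerate(line[:current_index]):
--         if ch in ('O', '#'):
--             result = i + 1
--     return result
-- ===== Notes on version B (the rewrite author's own statement) =====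
-- stated objective: simpler
-- what changed: Replaces the backward tail recursion (scan down from current_index-1 for the first 'O'/'#') with a single forward enumerate pass over line[:current_index] that keeps the position after the last 'O'/'#' seen.
-- intended difference: For negative current_index (with -len(line) < current_index) where a 'O'/'#' occurs in line[:current_index], A's negative-index wraparound returns a negative position (found_index - len(line) + 1) while B returns the intended non-negative position after the nearest preceding rock; B's is the natural reading of 'position after the nearest preceding rock'. — e.g. on get_final_upstream_position(-1, "#x"): A returns -1, B returns 1
import Mathlib
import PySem

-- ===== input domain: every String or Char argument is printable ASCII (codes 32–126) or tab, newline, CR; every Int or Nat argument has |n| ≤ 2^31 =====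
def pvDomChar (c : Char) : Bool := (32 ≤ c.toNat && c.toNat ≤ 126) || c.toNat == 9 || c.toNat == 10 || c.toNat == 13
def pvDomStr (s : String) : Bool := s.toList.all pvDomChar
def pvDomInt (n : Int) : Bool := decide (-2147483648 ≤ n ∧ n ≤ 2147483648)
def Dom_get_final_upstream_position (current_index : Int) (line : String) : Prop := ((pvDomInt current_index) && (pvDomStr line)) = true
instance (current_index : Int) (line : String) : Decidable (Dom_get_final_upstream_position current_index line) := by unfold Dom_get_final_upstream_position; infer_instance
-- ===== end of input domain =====

-- B replaces A's backward tail recursion by one forward enumerate pass keeping the last rock position (objective: simpler).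

-- ===== PORT A =====
-- literal transliteration of A's tail recursion; the `none` branch is Python's IndexError (outside Pre_)
def pvAGo (ci : Int) (l : List Char) : Int :=
  if ci = 0 then 0
  else
    match h2 : PySem.List.pyGet? l (ci - 1) with
    | none => 0
    | some c => if c = 'O' ∨ c = '#' then (ci - 1) + 1 else pvAGo (ci - 1) l
termination_by (ci + l.length).toNat
decreasing_by
  have hin : ¬ (PySem.List.pyGet? l (ci - 1) = none) := by simp [h2]
  rw [PySem.List.pyGet?_eq_none_iff] at hin
  have := not_not.mp hin
  unfold PySem.Raise.InRange at this
  omega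

def get_final_upstream_position (current_index : Int) (line : String) : Int :=
  pvAGo current_index line.toList

-- ===== PORT B =====
def get_final_upstream_position_alt (current_index : Int) (line : String) : Int :=
  (PySem.List.enumerate (PySem.List.slice line.toList none (some current_index)) 0).foldl
    (fun res p => if p.2 = 'O' ∨ p.2 = '#' then p.1 + 1 else res) 0

-- ===== PRECONDITION & SPEC =====
-- For negative current_index (with -len(line) < current_index) where an 'O'/'#' occurs in
-- line[:current_index], A's negative-index wraparound returns a negative position while B
-- returns the intended non-negative position after the nearest preceding rock.
def D_get_final_upstream_position (current_index : Int) (line : String) : Prop :=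
  current_index < 0 ∧ -(line.length : Int) < current_index ∧
    ∃ c ∈ line.toList.take ((line.length : Int) + current_index).toNat, c = 'O' ∨ c = '#'
instance (current_index : Int) (line : String) : Decidable (D_get_final_upstream_position current_index line) := by unfold D_get_final_upstream_position; infer_instance

-- Pre_ excludes exactly the inputs where A raises IndexError: current_index > len(line),
-- current_index ≤ -len(line) (with current_index ≠ 0), and negative current_index whose
-- wrapped-around scan runs off the front without meeting an 'O'/'#'.
def Pre_get_final_upstream_position (current_index : Int) (line : String) : Prop :=
  (0 ≤ current_index ∧ current_index ≤ (line.length : Int)) ∨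
    D_get_final_upstream_position current_index line
instance (current_index : Int) (line : String) : Decidable (Pre_get_final_upstream_position current_index line) := by unfold Pre_get_final_upstream_position; infer_instance

def pvWitness_get_final_upstream_position : Int × String := (1, "O")

def Spec_get_final_upstream_position (current_index : Int) (line : String) (out : Int) : Prop := ¬ D_get_final_upstream_position current_index line → out = get_final_upstream_position_alt current_index line
instance (current_index : Int) (line : String) (out : Int) : Decidable (Spec_get_final_upstream_position current_index line out) := by unfold Spec_get_final_upstream_position; infer_instance

def pvDiffWitness_get_final_upstream_position : Int × String := (-1, "#x")
def pvDiffWitnessOut_get_final_upstream_position : Int × Int := (-1, 1)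

-- ===== CLAIM (what is proved, stated in full; the proofs are below) =====
def Claim_unchanged_get_final_upstream_position : Prop := ∀ (current_index : Int) (line : String), Dom_get_final_upstream_position current_index line → Pre_get_final_upstream_position current_index line → Spec_get_final_upstream_position current_index line (get_final_upstream_position current_index line)
def Claim_changed_get_final_upstream_position : Prop := Dom_get_final_upstream_position (pvDiffWitness_get_final_upstream_position.1) (pvDiffWitness_get_final_upstream_position.2) ∧ Pre_get_final_upstream_position (pvDiffWitness_get_final_upstream_position.1) (pvDiffWitness_get_final_upstream_position.2) ∧ D_get_final_upstream_position (pvDiffWitness_get_final_upstream_position.1) (pvDiffWitness_get_final_upstream_position.2) ∧ get_final_upstream_position (pvDiffWitness_get_final_upstream_position.1) (pvDiffWitness_get_final_upstream_position.2) = pvDiffWitnessOut_get_final_upstream_position.1 ∧ get_final_upstream_position_alt (pvDiffWitness_get_final_upstream_position.1) (pvDiffWitness_get_final_upstream_position.2) = pvDiffWitnessOut_get_final_upstream_position.2 ∧ pvDiffWitnessOut_get_final_upstream_position.1 ≠ pvDiffWitnessOut_get_final_upstream_position.2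
def Claim_exact_get_final_upstream_position : Prop := ∀ (current_index : Int) (line : String), Dom_get_final_upstream_position current_index line → Pre_get_final_upstream_position current_index line → D_get_final_upstream_position current_index line → get_final_upstream_position current_index line ≠ get_final_upstream_position_alt current_index line

-- ===== LEMMAS AND PROOFS =====

-- the fold body of B
def pvBStep (res : Int) (p : Int × Char) : Int := if p.2 = 'O' ∨ p.2 = '#' then p.1 + 1 else res

theorem pvAGo_take (l : List Char) (k : Nat) (hk : k ≤ l.length) :
    pvAGo (k : Int) l = (PySem.List.enumerate (l.take k) 0).foldl pvBStep 0 := by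
  induction k with
  | zero => simp [pvAGo]
  | succ n ih =>
    have hn : n < l.length := by omega
    have htake : l.take (n + 1) = l.take n ++ [l[n]] := List.take_succ_eq_append_getElem hn
    rw [htake, PySem.List.enumerate_append]
    have hlen : (l.take n).length = n := by simp [List.length_take]; omega
    rw [List.foldl_append]
    have hget : PySem.List.pyGet? l (((n : Int) + 1) - 1) = some l[n] := by
      simp [hn]
    rw [show ((n + 1 : Nat) : Int) = (n : Int) + 1 by push_cast; ring]
    rw [pvAGo]
    have hne : ¬ ((n : Int) + 1 = 0) := by omega
    simp only [hne, if_false]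
    split
    · next heq => rw [hget] at heq; exact absurd heq (by simp)
    · next c heq =>
      rw [hget] at heq
      cases Option.some.inj heq
      by_cases hc : l[n] = 'O' ∨ l[n] = '#'
      · simp [hc, PySem.List.enumerate, pvBStep, hlen]
      · simp [hc, PySem.List.enumerate, pvBStep, hlen, ih (by omega)]

theorem pvAGo_nonpos (ci : Int) (l : List Char) (h : ci < 0) : pvAGo ci l ≤ 0 := by
  have hne : ci ≠ 0 := by omega
  rw [pvAGo]
  simp only [hne, if_false]
  cases h2 : PySem.List.pyGet? l (ci - 1) with
  | none => simp
  | some c =>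
    by_cases hc : c = 'O' ∨ c = '#'
    · simp [hc]; omega
    · simp only [hc, if_false]
      exact pvAGo_nonpos (ci - 1) l (by omega)
termination_by (ci + l.length).toNat
decreasing_by
  have hin : ¬ (PySem.List.pyGet? l (ci - 1) = none) := by simp [h2]
  rw [PySem.List.pyGet?_eq_none_iff] at hin
  have := not_not.mp hin
  unfold PySem.Raise.InRange at this
  omega

theorem pvB_pos (xs : List Char) (s acc : Int) (hs : 0 ≤ s)
    (h : 1 ≤ acc ∨ ∃ c ∈ xs, c = 'O' ∨ c = '#') :
    1 ≤ (PySem.List.enumerate xs s).foldl pvBStep acc := by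
  induction xs generalizing s acc with
  | nil =>
    rcases h with h1 | ⟨c, hc, _⟩
    · simpa [PySem.List.enumerate] using h1
    · simp at hc
  | cons x xs ih =>
    rw [PySem.List.enumerate_cons, List.foldl_cons]
    by_cases hx : x = 'O' ∨ x = '#'
    · refine ih (s + 1) _ (by omega) (Or.inl ?_)
      simp only [pvBStep, hx, if_true]
      omega
    · refine ih (s + 1) _ (by omega) ?_
      rcases h with h1 | ⟨c, hc, hm⟩
      · exact Or.inl (by simpa [pvBStep, hx] using h1)
      · rcases List.mem_cons.mp hc with rfl | hc'
        · exact absurd hm hx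
        · exact Or.inr ⟨c, hc', hm⟩

-- B's fold written via pvBStep
theorem alt_eq_fold (ci : Int) (line : String) :
    get_final_upstream_position_alt ci line =
      (PySem.List.enumerate (PySem.List.slice line.toList none (some ci)) 0).foldl pvBStep 0 := rfl

-- ===== VERDICT (by name: the statement is the Claim_ definition above) =====
theorem get_final_upstream_position_spec : Claim_unchanged_get_final_upstream_position := by
  intro ci line _ hpre hnd
  rcases hpre with ⟨h0, hle⟩ | hd
  · rw [alt_eq_fold, PySem.List.slice_to _ h0, get_final_upstream_position]
    have hl : line.toList.length = line.length := rfl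
    have : ci = ((ci.toNat : Nat) : Int) := by omega
    rw [this]
    exact pvAGo_take line.toList ci.toNat (by omega)
  · exact absurd hd hnd

theorem get_final_upstream_position_changed : Claim_changed_get_final_upstream_position := by
  unfold Claim_changed_get_final_upstream_position
  have hd : D_get_final_upstream_position (-1) "#x" :=
    ⟨by decide, by decide, '#', by decide, Or.inr rfl⟩
  refine ⟨by decide, ?_, hd, ?_, by decide, by decide⟩
  · exact Or.inr hd
  · show get_final_upstream_position (-1) "#x" = -1
    rw [get_final_upstream_position, pvAGo]
    rw [if_neg (by decide)]
    split
    · next heq => exact absurd heq (by decide)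
    · next c heq =>
      have h3 : PySem.List.pyGet? "#x".toList (-1 - 1) = some '#' := by decide
      rw [h3] at heq
      cases Option.some.inj heq
      decide

theorem get_final_upstream_position_tight : Claim_exact_get_final_upstream_position := by
  intro ci line _ _ hd
  rcases hd with ⟨hneg, hgt, c, hc, hm⟩
  have ha : get_final_upstream_position ci line ≤ 0 :=
    pvAGo_nonpos ci line.toList hneg
  have hl : line.toList.length = line.length := rfl
  have hslice : PySem.List.slice line.toList none (some ci) =
      line.toList.take (line.toList.length - (-ci).toNat) := by
    have h' : ci = -(((-ci).toNat : Nat) : Int) := by omega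
    conv_lhs => rw [h']
    exact PySem.List.slice_to_neg_natCast _ _ (by omega)
  have hb : 1 ≤ get_final_upstream_position_alt ci line := by
    rw [alt_eq_fold, hslice]
    refine pvB_pos _ 0 0 le_rfl (Or.inr ⟨c, ?_, hm⟩)
    have : line.toList.length - (-ci).toNat = ((line.length : Int) + ci).toNat := by omega
    rwa [this]
  omega
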